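-- pv_equiv track=rewrite | github.com/eeapbh/TIL | SWEA/SWEA_5203_베이비진게임_박봉현.py | check
-- ===== SOURCE A (Python) =====
-- from itertools import permutations
--
-- def check(arr):
--     perms = list(permutations(arr, 3))
--     for perm in perms:
--         if perm[0] == perm[1] and perm[1] == perm[2]:
--             return 1
--         if perm[0] + 1 == perm[1] and perm[1] + 1 == perm[2]:
--             return 1
--     return -1
-- ===== SOURCE B (Python) =====
-- def check(arr):
--     counts = {}
--     for v in arr:
--         counts[v] = counts.get(v, 0) + 1
--     for v, c in counts.items():
--         if c >= 3 or (v + 1 in counts and v + 2 in counts):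
--             return 1
--     return -1
-- ===== Notes on version B (the rewrite author's own statement) =====
-- stated objective: faster
-- what changed: replaces the scan over all 3-permutations of the array with a single frequency-count pass: return 1 iff some value occurs at least 3 times or v, v+1, v+2 are all present
import Mathlib
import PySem

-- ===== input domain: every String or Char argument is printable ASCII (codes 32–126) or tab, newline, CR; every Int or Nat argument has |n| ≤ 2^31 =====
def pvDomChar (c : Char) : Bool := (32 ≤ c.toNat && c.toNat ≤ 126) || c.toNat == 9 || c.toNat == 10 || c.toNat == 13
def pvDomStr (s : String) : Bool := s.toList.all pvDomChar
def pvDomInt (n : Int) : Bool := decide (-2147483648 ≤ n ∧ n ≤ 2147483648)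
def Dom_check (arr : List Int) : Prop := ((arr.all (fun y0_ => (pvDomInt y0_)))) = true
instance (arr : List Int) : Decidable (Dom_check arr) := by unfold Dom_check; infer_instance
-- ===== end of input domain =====

-- B replaces A's scan over all 3-permutations by one frequency-count pass (asymptotically faster; return value identical).

-- ===== PORT A =====
-- the 'for perm in perms' loop with its two early returns
def checkLoop : List (List Int) → Int
  | [] => -1
  | perm :: rest =>
    if PySem.List.pyGetD perm 0 0 = PySem.List.pyGetD perm 1 0 ∧
       PySem.List.pyGetD perm 1 0 = PySem.List.pyGetD perm 2 0 then 1
    else if PySem.List.pyGetD perm 0 0 + 1 = PySem.List.pyGetD perm 1 0 ∧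
            PySem.List.pyGetD perm 1 0 + 1 = PySem.List.pyGetD perm 2 0 then 1
    else checkLoop rest

def check (arr : List Int) : Int :=
  let perms := PySem.List.permutations arr 3
  checkLoop perms

-- ===== PORT B =====
-- the 'for v, c in counts.items()' loop with its early return
def altLoop (counts : PySem.Dict Int Int) : List (Int × Int) → Int
  | [] => -1
  | (v, c) :: rest =>
    if 3 ≤ c ∨ (counts.contains (v + 1) ∧ counts.contains (v + 2)) then 1
    else altLoop counts rest

def check_alt (arr : List Int) : Int :=
  let counts := arr.foldl (fun d x => d.insert x (d.getD x 0 + 1)) PySem.Dict.empty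
  altLoop counts counts.items

-- ===== PRECONDITION & SPEC =====
def Spec_check (arr : List Int) (out : Int) : Prop := out = check_alt arr
instance (arr : List Int) (out : Int) : Decidable (Spec_check arr out) := by unfold Spec_check; infer_instance

-- ===== CLAIM (what is proved, stated in full; the proofs are below) =====
def Claim_equal_check : Prop := ∀ (arr : List Int), Dom_check arr → Spec_check arr (check arr)

-- ===== LEMMAS AND PROOFS =====

-- A's loop returns 1 iff some permutation satisfies one of the two tests
lemma checkLoop_eq (ps : List (List Int)) :
    checkLoop ps =
      if ps.any (fun perm =>
        decide (PySem.List.pyGetD perm 0 0 = PySem.List.pyGetD perm 1 0 ∧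
                PySem.List.pyGetD perm 1 0 = PySem.List.pyGetD perm 2 0) ||
        decide (PySem.List.pyGetD perm 0 0 + 1 = PySem.List.pyGetD perm 1 0 ∧
                PySem.List.pyGetD perm 1 0 + 1 = PySem.List.pyGetD perm 2 0)) then 1 else -1 := by
  induction ps with
  | nil => simp [checkLoop]
  | cons p rest ih =>
    simp only [checkLoop, List.any_cons, ih]
    by_cases h1 : PySem.List.pyGetD p 0 0 = PySem.List.pyGetD p 1 0 ∧
        PySem.List.pyGetD p 1 0 = PySem.List.pyGetD p 2 0 <;>
      by_cases h2 : PySem.List.pyGetD p 0 0 + 1 = PySem.List.pyGetD p 1 0 ∧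
        PySem.List.pyGetD p 1 0 + 1 = PySem.List.pyGetD p 2 0 <;>
      simp [h1, h2]

-- B's loop returns 1 iff some item satisfies the test
lemma altLoop_eq (d : PySem.Dict Int Int) (items : List (Int × Int)) :
    altLoop d items =
      if items.any (fun vc =>
        decide (3 ≤ vc.2) || (d.contains (vc.1 + 1) && d.contains (vc.1 + 2))) then 1 else -1 := by
  induction items with
  | nil => simp [altLoop]
  | cons vc rest ih =>
    obtain ⟨v, c⟩ := vc
    simp only [altLoop, List.any_cons, ih]
    by_cases h : 3 ≤ c ∨ (d.contains (v + 1) ∧ d.contains (v + 2))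
    · rw [if_pos h]
      have hb : (decide (3 ≤ c) || (d.contains (v + 1) && d.contains (v + 2))) = true := by
        rcases h with h | ⟨h1, h2⟩ <;> simp [*]
      simp only [hb, Bool.true_or, if_pos]
    · rw [if_neg h]
      have hc : ¬ (3 ≤ c) := fun hh => h (Or.inl hh)
      have hab : (d.contains (v + 1) && d.contains (v + 2)) = false := by
        cases hA : d.contains (v + 1) <;> cases hB : d.contains (v + 2) <;> simp_all
      simp only [hab, decide_eq_false hc, Bool.false_or, Bool.or_false]

-- converse of exists_perm_of_mem_permutations: any length-r "sub-permutation" occurs in permutations xs r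
lemma mem_permutations_of_append_perm :
    ∀ (p : List Int) (xs rest : List Int), (p ++ rest).Perm xs → p ∈ PySem.List.permutations xs p.length
  | [], xs, rest, _ => by simp [PySem.List.permutations_zero]
  | x :: t, xs, rest, h => by
    have hx : x ∈ xs := h.mem_iff.mp (by simp)
    obtain ⟨i, hi, hgi⟩ := List.getElem_of_mem hx
    have hopt : xs[i]? = some x := by rw [List.getElem?_eq_getElem hi, hgi]
    have hperm : (x :: xs.eraseIdx i).Perm xs := PySem.List.perm_cons_eraseIdx xs hopt
    have htr : (t ++ rest).Perm (xs.eraseIdx i) := by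
      have : (x :: (t ++ rest)).Perm (x :: xs.eraseIdx i) := h.trans hperm.symm
      exact this.cons_inv
    have ih := mem_permutations_of_append_perm t (xs.eraseIdx i) rest htr
    show x :: t ∈ PySem.List.permutations xs (t.length + 1)
    rw [PySem.List.permutations_succ]
    refine List.mem_flatMap.mpr ⟨i, List.mem_range.mpr hi, ?_⟩
    rw [hopt]
    exact List.mem_map.mpr ⟨t, ih, rfl⟩

lemma subperm_mem_permutations (p xs : List Int) (h : ∀ v, p.count v ≤ xs.count v) :
    p ∈ PySem.List.permutations xs p.length := by
  obtain ⟨l, hl, hsub⟩ := List.subperm_ext_iff.mpr (fun a _ => h a)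
  obtain ⟨rest, hrest⟩ := hsub.exists_perm_append
  exact mem_permutations_of_append_perm p xs rest ((hl.symm.append_right rest).trans hrest.symm)

-- the two existence conditions coincide
lemma any_perm_iff (arr : List Int) :
    ((PySem.List.permutations arr 3).any (fun perm =>
        decide (PySem.List.pyGetD perm 0 0 = PySem.List.pyGetD perm 1 0 ∧
                PySem.List.pyGetD perm 1 0 = PySem.List.pyGetD perm 2 0) ||
        decide (PySem.List.pyGetD perm 0 0 + 1 = PySem.List.pyGetD perm 1 0 ∧
                PySem.List.pyGetD perm 1 0 + 1 = PySem.List.pyGetD perm 2 0))) =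
    (arr.any (fun v =>
        decide (3 ≤ (arr.count v : Int)) ||
        (decide (v + 1 ∈ arr) && decide (v + 2 ∈ arr)))) := by
  rw [Bool.eq_iff_iff]
  simp only [List.any_eq_true, Bool.or_eq_true, decide_eq_true_eq, Bool.and_eq_true]
  constructor
  · rintro ⟨p, hp, hcond⟩
    have h3 : p.length = 3 := PySem.List.length_of_mem_permutations hp
    obtain ⟨a, b, c, rfl⟩ : ∃ a b c, p = [a, b, c] := by
      match p, h3 with
      | [a, b, c], _ => exact ⟨a, b, c, rfl⟩
    obtain ⟨_, rest, hrest⟩ := PySem.List.exists_perm_of_mem_permutations 3 arr _ hp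
    have hmema : a ∈ arr := PySem.List.mem_of_mem_of_mem_permutations hp (by simp)
    have g0 : PySem.List.pyGetD [a, b, c] 0 0 = a := rfl
    have g1 : PySem.List.pyGetD [a, b, c] 1 0 = b := rfl
    have g2 : PySem.List.pyGetD [a, b, c] 2 0 = c := rfl
    rw [g0, g1, g2] at hcond
    rcases hcond with ⟨h1, h2⟩ | ⟨h1, h2⟩
    · refine ⟨a, hmema, Or.inl ?_⟩
      subst h1 h2
      have hc := hrest.count_eq a
      simp at hc
      omega
    · refine ⟨a, hmema, Or.inr ⟨?_, ?_⟩⟩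
      · rw [h1]; exact PySem.List.mem_of_mem_of_mem_permutations hp (by simp)
      · have hcc : a + 2 = c := by omega
        rw [hcc]; exact PySem.List.mem_of_mem_of_mem_permutations hp (by simp)
  · rintro ⟨v, hv, hcond⟩
    rcases hcond with h3 | ⟨h1, h2⟩
    · refine ⟨[v, v, v], ?_, Or.inl (by constructor <;> rfl)⟩
      refine subperm_mem_permutations [v, v, v] arr ?_
      intro w
      by_cases hw : w = v
      · subst hw
        have : 3 ≤ arr.count w := by exact_mod_cast h3
        simpa using this
      · simp [Ne.symm hw]
    · refine ⟨[v, v + 1, v + 2], ?_, Or.inr ⟨rfl, by show v + 1 + 1 = v + 2; omega⟩⟩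
      refine subperm_mem_permutations [v, v + 1, v + 2] arr ?_
      intro w
      by_cases hw1 : w = v
      · subst hw1
        have : List.count w [w, w + 1, w + 2] = 1 := by
          simp
        rw [this]
        exact List.count_pos_iff.mpr hv
      · by_cases hw2 : w = v + 1
        · subst hw2
          have : List.count (v + 1) [v, v + 1, v + 2] = 1 := by
            simp
          rw [this]
          exact List.count_pos_iff.mpr h1
        · by_cases hw3 : w = v + 2
          · subst hw3
            have : List.count (v + 2) [v, v + 1, v + 2] = 1 := by
              simp
            rw [this]
            exact List.count_pos_iff.mpr h2
          · simp [Ne.symm hw1, Ne.symm hw2, Ne.symm hw3]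

-- B's any over counter items equals the any over arr's values
lemma any_items_iff (arr : List Int) :
    (((PySem.Dict.counter arr).items).any (fun vc =>
        decide (3 ≤ vc.2) ||
        ((PySem.Dict.counter arr).contains (vc.1 + 1) && (PySem.Dict.counter arr).contains (vc.1 + 2)))) =
    (arr.any (fun v =>
        decide (3 ≤ (arr.count v : Int)) ||
        (decide (v + 1 ∈ arr) && decide (v + 2 ∈ arr)))) := by
  rw [PySem.Dict.items_counter, Bool.eq_iff_iff]
  simp only [List.any_eq_true, List.mem_map, PySem.Dict.contains_counter]
  constructor
  · rintro ⟨vc, ⟨k, hk, rfl⟩, h⟩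
    exact ⟨k, (PySem.Set.mem_ofList _ _).mp hk, by simpa using h⟩
  · rintro ⟨v, hv, h⟩
    exact ⟨(v, (arr.count v : Int)), ⟨v, (PySem.Set.mem_ofList _ _).mpr hv, rfl⟩, by simpa using h⟩

-- ===== VERDICT (by name: the statement is the Claim_ definition above) =====
theorem check_spec : Claim_equal_check := by
  intro arr _
  show check arr = check_alt arr
  rw [check, check_alt, checkLoop_eq, PySem.Dict.foldl_insert_getD_add_one_eq_counter, altLoop_eq,
    any_perm_iff, any_items_iff]
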